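-- pv_equiv track=rewrite | github.com/Thanvithmk/EduFlow | backend/app/services/schedule_service.py | subtract_slots
-- ===== SOURCE A (Python) =====
-- def subtract_slots(slots, start, end):
--     result = []
--
--     for s, e in slots:
--         if end <= s or start >= e:
--             result.append((s, e))
--         else:
--             if s < start:
--                 result.append((s, start))
--             if end < e:
--                 result.append((end, e))
--
--     return result
-- ===== SOURCE B (Python) =====
-- def subtract_slots(slots, start, end):
--     result = []
--     for s, e in slots:
--         if not (s < end and start < e):
--             result.append((s, e))  # slot untouched by the subtracted interval
--             continue
--         # cut the slot at the interval's endpoints that fall strictly inside it,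
--         # pair consecutive boundary points, keep nonempty pieces not covered by [start, end]
--         pts = [s] + [p for p in (start, end) if s < p < e] + [e]
--         for a, b in zip(pts, pts[1:]):
--             if a < b and not (start <= a and b <= end):
--                 result.append((a, b))
--     return result
-- ===== Notes on version B (the rewrite author's own statement) =====
-- stated objective: alternative
-- what changed: Replaces A's branch tree of three conditional appends by a cut-point algorithm: for an affected slot it builds the boundary list [s, interior cut points of (start,end), e], pairs consecutive points, and keeps the nonempty pieces not covered by [start,end].
import Mathlib
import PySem

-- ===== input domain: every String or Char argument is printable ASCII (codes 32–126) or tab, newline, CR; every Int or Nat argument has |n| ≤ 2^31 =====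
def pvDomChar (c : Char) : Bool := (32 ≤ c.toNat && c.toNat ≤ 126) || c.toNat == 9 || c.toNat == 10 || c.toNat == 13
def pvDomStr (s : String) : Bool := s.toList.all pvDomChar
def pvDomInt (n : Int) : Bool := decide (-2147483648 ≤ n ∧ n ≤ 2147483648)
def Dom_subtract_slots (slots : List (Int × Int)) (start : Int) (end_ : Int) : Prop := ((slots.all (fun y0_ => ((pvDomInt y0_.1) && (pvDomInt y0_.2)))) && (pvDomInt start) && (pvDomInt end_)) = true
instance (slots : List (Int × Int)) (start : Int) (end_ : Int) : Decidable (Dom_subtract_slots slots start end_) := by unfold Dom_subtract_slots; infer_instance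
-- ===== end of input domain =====

-- B replaces A's conditional-append branch tree by a cut-point algorithm (boundary list,
-- consecutive pairing, nonempty-and-not-covered filter); alternative decomposition, same cost.
-- ===== PORT A =====
def subtract_slots (slots : List (Int × Int)) (start : Int) (end_ : Int) : List (Int × Int) :=
  slots.foldl (fun result p =>
    let s := p.1
    let e := p.2
    if end_ ≤ s ∨ start ≥ e then
      result ++ [(s, e)]
    else
      let r1 := if s < start then result ++ [(s, start)] else result
      if end_ < e then r1 ++ [(end_, e)] else r1) []

-- ===== PORT B =====
def subtract_slots_alt (slots : List (Int × Int)) (start : Int) (end_ : Int) : List (Int × Int) :=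
  slots.foldl (fun result p =>
    let s := p.1
    let e := p.2
    if ¬ (s < end_ ∧ start < e) then
      result ++ [(s, e)]
    else
      let pts := [s] ++ ([start, end_].filter (fun q => s < q ∧ q < e)) ++ [e]
      result ++ ((pts.zip pts.tail).filter (fun c => c.1 < c.2 ∧ ¬ (start ≤ c.1 ∧ c.2 ≤ end_)))) []

-- ===== PRECONDITION & SPEC =====
def Spec_subtract_slots (slots : List (Int × Int)) (start : Int) (end_ : Int) (out : List (Int × Int)) : Prop := out = subtract_slots_alt slots start end_
instance (slots : List (Int × Int)) (start : Int) (end_ : Int) (out : List (Int × Int)) : Decidable (Spec_subtract_slots slots start end_ out) := by unfold Spec_subtract_slots; infer_instance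

-- ===== CLAIM (what is proved, stated in full; the proofs are below) =====
def Claim_equal_subtract_slots : Prop := ∀ (slots : List (Int × Int)) (start : Int) (end_ : Int), Dom_subtract_slots slots start end_ → Spec_subtract_slots slots start end_ (subtract_slots slots start end_)

-- ===== LEMMAS AND PROOFS =====


-- A's per-slot step appends exactly the pieces B's cut-point step produces for that slot.
theorem pvStep_eq (start end_ s e : Int) (result : List (Int × Int)) :
    (if end_ ≤ s ∨ start ≥ e then
      result ++ [(s, e)]
    else
      let r1 := if s < start then result ++ [(s, start)] else result
      if end_ < e then r1 ++ [(end_, e)] else r1)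
    =
    (if ¬ (s < end_ ∧ start < e) then
      result ++ [(s, e)]
    else
      let pts := [s] ++ ([start, end_].filter (fun q => s < q ∧ q < e)) ++ [e]
      result ++ ((pts.zip pts.tail).filter (fun c => c.1 < c.2 ∧ ¬ (start ≤ c.1 ∧ c.2 ≤ end_)))) := by
  by_cases hov : s < end_ ∧ start < e
  · have hg : ¬ (end_ ≤ s ∨ start ≥ e) := by omega
    simp only [if_neg hg, if_neg (not_not_intro hov), List.filter]
    by_cases hl : s < start <;> by_cases hr : end_ < e <;>
      simp [hl, hr, List.zip, List.zipWith, List.filter, hov.1, hov.2]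
  · have hg : end_ ≤ s ∨ start ≥ e := by omega
    simp [hg, hov]

theorem pvFoldl_eq (start end_ : Int) (slots : List (Int × Int)) (acc : List (Int × Int)) :
    slots.foldl (fun result p =>
      let s := p.1
      let e := p.2
      if end_ ≤ s ∨ start ≥ e then
        result ++ [(s, e)]
      else
        let r1 := if s < start then result ++ [(s, start)] else result
        if end_ < e then r1 ++ [(end_, e)] else r1) acc
    =
    slots.foldl (fun result p =>
      let s := p.1
      let e := p.2
      if ¬ (s < end_ ∧ start < e) then
        result ++ [(s, e)]
      else
        let pts := [s] ++ ([start, end_].filter (fun q => s < q ∧ q < e)) ++ [e]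
        result ++ ((pts.zip pts.tail).filter (fun c => c.1 < c.2 ∧ ¬ (start ≤ c.1 ∧ c.2 ≤ end_)))) acc := by
  induction slots generalizing acc with
  | nil => rfl
  | cons hd tl ih =>
    simp only [List.foldl_cons]
    rw [pvStep_eq]
    exact ih _

-- ===== VERDICT =====
theorem subtract_slots_spec : Claim_equal_subtract_slots := by
  intro slots start end_ _
  unfold Spec_subtract_slots subtract_slots subtract_slots_alt
  exact pvFoldl_eq start end_ slots []
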